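-- pv_equiv track=rewrite | github.com/glottobank/pygrambank | src/pygrambank/util.py | _normalized_row
-- ===== SOURCE A (Python) =====
-- import collections
--
-- GB_COLS = collections.OrderedDict([
--     ("Language_ID", ["iso-639-3", "Language", "Glottocode", "glottocode"]),
--     ("Feature_ID", ["GramBank ID", "Grambank ID", "\* Feature number", "Grambank"]),
--     ("Value", []),
--     ("Source", []),
--     ("Comment", ["Freetext comment"]),
--     ("Feature Domain", ["Possible Values"]),
-- ])
--
-- def normalized_feature_id(s):
--     if s.isdigit():
--         s = "GB" + str(s).zfill(3)
--     elif s.startswith("GB") and len(s) != 5: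
--         s = "GB" + str(s[2:]).zfill(3)
--     return s
--
-- def normalize_comment(s):
--     """
--     Normalize comments, turning things like "????" into "?".
--
--     :param s: The original comment
--     :return: The normalized comment as string
--     """
--     if s:
--         if set(s) == {'#'}:
--             return
--         if set(s) == {'?'}:
--             return '?'
--         return s
--
-- def normalized_value(v):
--     if v in {
--         '?',
--         '??',
--         'n/a',
--         'N/A',
--         'n.a.',
--         'n.a',
--         'N.A.',
--         'N.A',
--         '-',
--         'NODATA',
--         '? - Not known'
--         '*',
--         "*",
--         '\\',
--         'x',
--     }:
--         return '?'
--     return v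
--
-- def _normalized_row(row):
--     for k in row:
--         row[k] = row[k].strip() if row[k] else row[k]
--
--     # Normalize column names:
--     if 'Grambank ID' in row and 'Feature_ID' in row:
--         row['Feature'] = row.pop('Feature_ID')
--
--     for col, aliases in GB_COLS.items():
--         if col not in row:
--             for k in list(row.keys()):
--                 if k in aliases:
--                     row[col] = row.pop(k)
--                     break
--             else:
--                 row[col] = ''
--
--     # Normalize colum values:
--     row['Language_ID'] = None
--     row['Feature_ID'] = normalized_feature_id(row['Feature_ID'])
--     row['Value'] = normalized_value(row.get('Value'))
--     row['Comment'] = normalize_comment(row['Comment'])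
--     return row
-- ===== SOURCE B (Python) =====
-- import collections
--
-- GB_COLS = collections.OrderedDict([
--     ("Language_ID", ["iso-639-3", "Language", "Glottocode", "glottocode"]),
--     ("Feature_ID", ["GramBank ID", "Grambank ID", "\* Feature number", "Grambank"]),
--     ("Value", []),
--     ("Source", []),
--     ("Comment", ["Freetext comment"]),
--     ("Feature Domain", ["Possible Values"]),
-- ])
--
-- _ALIAS_OF = {a: col for col, aliases in GB_COLS.items() for a in aliases}
--
--
-- def normalized_feature_id(s):
--     if s.isdigit():
--         s = "GB" + str(s).zfill(3)
--     elif s.startswith("GB") and len(s) != 5: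
--         s = "GB" + str(s[2:]).zfill(3)
--     return s
--
--
-- def normalize_comment(s):
--     if s:
--         if set(s) == {'#'}:
--             return
--         if set(s) == {'?'}:
--             return '?'
--         return s
--
--
-- def normalized_value(v):
--     if v in {
--         '?', '??', 'n/a', 'N/A', 'n.a.', 'n.a', 'N.A.', 'N.A', '-', 'NODATA',
--         '? - Not known' '*', "*", '\\', 'x',
--     }:
--         return '?'
--     return v
--
--
-- def _fix(k, v):
--     if k == 'Language_ID':
--         return None
--     if k == 'Feature_ID':
--         return normalized_feature_id(v)
--     if k == 'Value':
--         return normalized_value(v)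
--     if k == 'Comment':
--         return normalize_comment(v)
--     return v
--
--
-- def _normalized_row(row):
--     vals = {k: (v.strip() if v else v) for k, v in row.items()}
--     if 'Grambank ID' in vals and 'Feature_ID' in vals:
--         vals['Feature'] = vals.pop('Feature_ID')
--     # first alias (in row order) feeding each absent canonical column
--     feeds = {}
--     for k in vals:
--         col = _ALIAS_OF.get(k)
--         if col is not None and col not in vals and col not in feeds:
--             feeds[col] = k
--     consumed = set(feeds.values())
--     out = {k: v for k, v in vals.items() if k not in consumed}
--     for col in GB_COLS:
--         if col not in vals:
--             out[col] = vals[feeds[col]] if col in feeds else ''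
--     return {k: _fix(k, v) for k, v in out.items()}
-- ===== Notes on version B (the rewrite author's own statement) =====
-- stated objective: alternative
-- what changed: B precomputes a reverse alias->column dict and rebuilds the row in one pass (strip values, one scan collecting which key feeds each absent canonical column, filter out consumed keys, append the missing columns, then one value-normalizing map), instead of A's per-column rescans of the live dict with pop/insert mutation.
import Mathlib
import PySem

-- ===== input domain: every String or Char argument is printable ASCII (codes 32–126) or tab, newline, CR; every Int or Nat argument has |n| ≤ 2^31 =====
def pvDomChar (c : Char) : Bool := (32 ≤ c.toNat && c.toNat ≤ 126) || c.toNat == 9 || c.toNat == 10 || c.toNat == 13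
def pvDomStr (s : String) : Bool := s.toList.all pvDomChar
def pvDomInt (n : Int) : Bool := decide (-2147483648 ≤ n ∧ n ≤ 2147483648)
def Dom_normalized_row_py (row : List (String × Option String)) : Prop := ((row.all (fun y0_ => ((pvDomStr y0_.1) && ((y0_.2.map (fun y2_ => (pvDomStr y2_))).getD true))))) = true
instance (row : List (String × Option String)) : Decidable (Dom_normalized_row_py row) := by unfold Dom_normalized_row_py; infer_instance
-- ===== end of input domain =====

-- B replaces A's per-column alias scans (pop/insert mutation) by one reverse-alias map pass plus a
-- single rebuild of the row (objective: alternative, same cost). Equivalence is about the RETURN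
-- value only: Python A mutates its argument in place, B does not.

-- ===== PORT A =====
-- module constant GB_COLS
def pvGBCols : List (String × List String) :=
  [("Language_ID", ["iso-639-3", "Language", "Glottocode", "glottocode"]),
   ("Feature_ID", ["GramBank ID", "Grambank ID", "\\* Feature number", "Grambank"]),
   ("Value", []),
   ("Source", []),
   ("Comment", ["Freetext comment"]),
   ("Feature Domain", ["Possible Values"])]

-- row[k].strip() if row[k] else row[k]  (truthy = not None and not "")
def pvStripVal (v : Option String) : Option String :=
  match v with
  | some s => if s ≠ "" then some (PySem.Str.strip s) else some s
  | none => none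

-- module helper normalized_feature_id (total on String; Python receives a str here inside Pre_)
def pvNormalizedFeatureId (s : String) : String :=
  if PySem.Str.strIsdigit s then "GB" ++ PySem.Str.zfill s 3
  else if PySem.Str.startswith s "GB" && !(PySem.Str.len s == 5) then
    "GB" ++ PySem.Str.zfill (PySem.Str.slice s (some 2) none) 3
  else s

-- module helper normalized_value; `None in {…}` is False, so none passes through
def pvNormalizedValue (v : Option String) : Option String :=
  if ([some "?", some "??", some "n/a", some "N/A", some "n.a.", some "n.a", some "N.A.",
       some "N.A", some "-", some "NODATA", some "? - Not known*", some "*", some "\\",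
       some "x"] : List (Option String)).contains v
  then some "?" else v

-- module helper normalize_comment; `set(s) == {'#'}` ⟺ s ≠ "" and every char is '#' (exact: s is
-- nonempty in that branch), likewise for '?'
def pvNormalizeComment (v : Option String) : Option String :=
  match v with
  | none => none
  | some s =>
    if s ≠ "" then
      if s.toList.all (· == '#') then none
      else if s.toList.all (· == '?') then some "?"
      else some s
    else none

def normalized_row_py (row : List (String × Option String)) : List (String × Option String) :=
  let d0 := PySem.Dict.ofList row
  -- for k in row: row[k] = row[k].strip() if row[k] else row[k]
  let d1 := d0.keys.foldl (fun d k => d.insert k (pvStripVal (d.getD k none))) d0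
  -- if 'Grambank ID' in row and 'Feature_ID' in row: row['Feature'] = row.pop('Feature_ID')
  let d2 := if d1.contains "Grambank ID" && d1.contains "Feature_ID" then
      (d1.erase "Feature_ID").insert "Feature" (d1.getD "Feature_ID" none)
    else d1
  -- for col, aliases in GB_COLS.items(): if col not in row: first alias key is popped into col, else ''
  let d3 := pvGBCols.foldl (fun d ca =>
      if d.contains ca.1 then d
      else match d.keys.find? (fun k => ca.2.contains k) with
        | some k => (d.erase k).insert ca.1 (d.getD k none)
        | none => d.insert ca.1 (some "")) d2
  -- value normalization; row['Feature_ID'] = None raises AttributeError in Python — excluded by Pre_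
  let d4 := d3.insert "Language_ID" none
  let d5 := d4.insert "Feature_ID" ((d4.getD "Feature_ID" none).map pvNormalizedFeatureId)
  let d6 := d5.insert "Value" (pvNormalizedValue (d5.getD "Value" none))
  let d7 := d6.insert "Comment" (pvNormalizeComment (d6.getD "Comment" none))
  d7.items

-- ===== PORT B =====
-- _ALIAS_OF = {a: col for col, aliases in GB_COLS.items() for a in aliases}
def pvAliasOf : PySem.Dict String String :=
  PySem.Dict.ofList (pvGBCols.flatMap (fun ca => ca.2.map (fun a => (a, ca.1))))

-- _fix(k, v); Feature_ID = None raises AttributeError in Python — excluded by Pre_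
def pvFix (k : String) (v : Option String) : Option String :=
  if k = "Language_ID" then none
  else if k = "Feature_ID" then v.map pvNormalizedFeatureId
  else if k = "Value" then pvNormalizedValue v
  else if k = "Comment" then pvNormalizeComment v
  else v

def normalized_row_py_alt (row : List (String × Option String)) : List (String × Option String) :=
  -- vals = {k: (v.strip() if v else v) for k, v in row.items()}
  let vals0 := PySem.Dict.mk ((PySem.Dict.ofList row).items.map (fun p => (p.1, pvStripVal p.2)))
  let vals := if vals0.contains "Grambank ID" && vals0.contains "Feature_ID" then
      (vals0.erase "Feature_ID").insert "Feature" (vals0.getD "Feature_ID" none)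
    else vals0
  -- feeds: first alias (in row order) feeding each absent canonical column
  let feeds := vals.keys.foldl (fun f k =>
      match pvAliasOf.get? k with
      | some col => if !vals.contains col && !f.contains col then f.insert col k else f
      | none => f) PySem.Dict.empty
  let consumed := PySem.Set.ofList feeds.values
  -- out = {k: v for k, v in vals.items() if k not in consumed}, then the missing-column loop appends
  -- (col, fed value or '') pairs — fresh distinct keys, so the dict literally grows at the end
  let kept := vals.items.filter (fun p => !consumed.contains p.1)
  let extra := pvGBCols.filterMap (fun ca =>
      if vals.contains ca.1 then none
      else some (ca.1, match feeds.get? ca.1 with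
        | some k => vals.getD k none
        | none => some ""))
  -- return {k: _fix(k, v) for k, v in out.items()}
  (kept ++ extra).map (fun p => (p.1, pvFix p.1 p.2))

-- ===== PRECONDITION & SPEC =====
-- Pre_ excludes exactly the rows on which A raises AttributeError: those where the value that ends
-- up in 'Feature_ID' (its own value, or the first Feature_ID-alias value when it is absent or moved
-- to 'Feature') is None, so that normalized_feature_id is called on None.
def Pre_normalized_row_py (row : List (String × Option String)) : Prop :=
  (let d := PySem.Dict.ofList row
   if d.contains "Feature_ID" && !(d.contains "Grambank ID") then d.get? "Feature_ID"
   else (d.items.find? (fun p =>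
      (["GramBank ID", "Grambank ID", "\\* Feature number", "Grambank"] : List String).contains p.1)).map (·.2))
  ≠ some none
instance (row : List (String × Option String)) : Decidable (Pre_normalized_row_py row) := by
  unfold Pre_normalized_row_py; infer_instance

def pvWitness_normalized_row_py : (List (String × Option String)) := [("Feature_ID", some "1")]

def Spec_normalized_row_py (row : List (String × Option String)) (out : List (String × Option String)) : Prop := out = normalized_row_py_alt row
instance (row : List (String × Option String)) (out : List (String × Option String)) : Decidable (Spec_normalized_row_py row out) := by unfold Spec_normalized_row_py; infer_instance

-- ===== CLAIM (what is proved, stated in full; the proofs are below) =====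
def Claim_equal_normalized_row_py : Prop := ∀ (row : List (String × Option String)), Dom_normalized_row_py row → Pre_normalized_row_py row → Spec_normalized_row_py row (normalized_row_py row)


-- ===== LEMMAS AND PROOFS =====

-- abbreviation for the value-stripping map
def pvM (p : String × Option String) : String × Option String := (p.1, pvStripVal p.2)

-- one step of A's per-column loop
def pvFill (d : PySem.Dict String (Option String)) (ca : String × List String) :
    PySem.Dict String (Option String) :=
  if d.contains ca.1 then d
  else match d.keys.find? (fun k => ca.2.contains k) with
    | some k => (d.erase k).insert ca.1 (d.getD k none)
    | none => d.insert ca.1 (some "")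

-- keys consumed (popped) by A's loop, and the pairs it appends, computed directly from the input dict
def pvConsumed (cols : List (String × List String)) (V : PySem.Dict String (Option String)) :
    List String :=
  cols.filterMap (fun ca => if V.contains ca.1 then none else V.keys.find? (fun k => ca.2.contains k))

def pvExtra (cols : List (String × List String)) (V : PySem.Dict String (Option String)) :
    List (String × Option String) :=
  cols.filterMap (fun ca =>
    if V.contains ca.1 then none
    else some (ca.1, match V.keys.find? (fun k => ca.2.contains k) with
      | some k => V.getD k none
      | none => some ""))

-- sanity hypotheses about a column table: distinct column names, pairwise-disjoint alias lists,
-- no column name occurring in any alias list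
def pvHcols (cols : List (String × List String)) : Prop :=
  (cols.map Prod.fst).Nodup ∧
  List.Pairwise (fun x y => ∀ a ∈ x.2, a ∉ y.2) cols ∧
  (∀ ca ∈ cols, ∀ cb ∈ cols, ca.1 ∉ cb.2)

lemma pvFindKey_none {β : Type} (l : List (String × β)) (a : String)
    (h : a ∉ l.map Prod.fst) : l.find? (fun p => p.1 == a) = none := by
  rw [List.find?_eq_none]
  intro p hp
  simp only [beq_iff_eq]
  intro e
  exact h (by simpa using List.mem_map.mpr ⟨p, hp, e⟩)

lemma pvMapReplace_id {β : Type} (l : List (String × β)) (a : String) (c : String × β)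
    (h : a ∉ l.map Prod.fst) : l.map (fun p => if p.1 == a then c else p) = l := by
  conv_rhs => rw [← List.map_id l]
  refine List.map_congr_left ?_
  intro p hp
  simp only [beq_iff_eq, id]
  rw [if_neg]
  intro e
  exact h (by simpa using List.mem_map.mpr ⟨p, hp, e⟩)

lemma pvStep0Aux : ∀ (ys xs : List (String × Option String)),
    ((xs ++ ys).map Prod.fst).Nodup →
    (ys.map Prod.fst).foldl (fun d k => d.insert k (pvStripVal (d.getD k none)))
        (PySem.Dict.mk (xs.map pvM ++ ys))
      = PySem.Dict.mk ((xs ++ ys).map pvM) := by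
  intro ys
  induction ys with
  | nil => intro xs _; simp
  | cons y ys ih =>
    intro xs hn
    have hky : y.1 ∉ xs.map Prod.fst ∧ y.1 ∉ ys.map Prod.fst := by
      simp only [List.map_append, List.nodup_append, List.map_cons, List.nodup_cons] at hn
      exact ⟨fun hx => (hn.2.2 y.1 hx y.1 (by simp)) rfl, hn.2.1.1⟩
    have hget : (PySem.Dict.mk (xs.map pvM ++ y :: ys)).getD y.1 none = y.2 := by
      simp only [PySem.Dict.getD, PySem.Dict.get?, PySem.Dict.items, List.find?_append]
      rw [pvFindKey_none (xs.map pvM) y.1 (by simpa [pvM, Function.comp] using hky.1)]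
      simp [List.find?_cons_of_pos]
    have hcont : (PySem.Dict.mk (xs.map pvM ++ y :: ys)).contains y.1 = true := by
      simp [PySem.Dict.contains, PySem.Dict.items, List.any_append]
    have hstep : (PySem.Dict.mk (xs.map pvM ++ y :: ys)).insert y.1
        (pvStripVal ((PySem.Dict.mk (xs.map pvM ++ y :: ys)).getD y.1 none))
        = PySem.Dict.mk ((xs ++ [y]).map pvM ++ ys) := by
      rw [hget]
      simp only [PySem.Dict.insert, hcont, if_pos, PySem.Dict.items]
      congr 1
      rw [List.map_append, List.map_cons]
      rw [pvMapReplace_id (xs.map pvM) y.1 _ (by simpa [pvM, Function.comp] using hky.1)]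
      rw [pvMapReplace_id ys y.1 _ hky.2]
      simp [pvM]
    simp only [List.map_cons, List.foldl_cons, hstep]
    have := ih (xs ++ [y]) (by simpa using hn)
    simpa using this

theorem pvStep0 (d : PySem.Dict String (Option String)) (hn : d.keys.Nodup) :
    d.keys.foldl (fun d k => d.insert k (pvStripVal (d.getD k none))) d
      = PySem.Dict.mk (d.items.map pvM) := by
  have := pvStep0Aux d.items []
  simp only [List.nil_append, List.map_nil] at this
  exact this (by simpa [PySem.Dict.keys] using hn)

lemma pvKeysErase (d : PySem.Dict String (Option String)) (k : String) :
    (d.erase k).keys = d.keys.filter (fun x => !(x == k)) := by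
  simp only [PySem.Dict.erase, PySem.Dict.keys, PySem.Dict.items, List.filter_map]
  rfl

-- keys are unique after the strip map and the Grambank-ID move
lemma pvNodupStrip (row : List (String × Option String)) :
    (PySem.Dict.mk ((PySem.Dict.ofList row).items.map pvM)).keys.Nodup := by
  have h : (PySem.Dict.mk ((PySem.Dict.ofList row).items.map pvM)).keys
      = (PySem.Dict.ofList row).keys := by
    simp [PySem.Dict.keys, List.map_map, pvM, Function.comp]
  rw [h]
  exact PySem.Dict.nodup_keys_ofList row

lemma pvNodupPhase2 (d : PySem.Dict String (Option String)) (hn : d.keys.Nodup) :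
    (if d.contains "Grambank ID" && d.contains "Feature_ID" then
       (d.erase "Feature_ID").insert "Feature" (d.getD "Feature_ID" none)
     else d).keys.Nodup := by
  split
  · exact PySem.Dict.nodup_keys_insert _ _ _ (by rw [pvKeysErase]; exact hn.filter _)
  · exact hn

lemma pvNodupFill (cols : List (String × List String)) :
    ∀ (V : PySem.Dict String (Option String)), V.keys.Nodup → (cols.foldl pvFill V).keys.Nodup := by
  induction cols with
  | nil => intro V hn; simpa using hn
  | cons ca rest ih =>
    intro V hn
    simp only [List.foldl_cons]
    refine ih _ ?_
    unfold pvFill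
    split
    · exact hn
    · split
      · exact PySem.Dict.nodup_keys_insert _ _ _ (by rw [pvKeysErase]; exact hn.filter _)
      · exact PySem.Dict.nodup_keys_insert _ _ _ hn

-- the reverse alias map agrees with membership in each column's alias list
lemma pvAliasSpec (ca : String × List String) (hca : ca ∈ pvGBCols) (k : String) :
    (pvAliasOf.get? k == some ca.1) = ca.2.contains k := by
  by_cases hk : k ∈ ["iso-639-3", "Language", "Glottocode", "glottocode", "GramBank ID",
      "Grambank ID", "\\* Feature number", "Grambank", "Freetext comment", "Possible Values"]
  · fin_cases hca <;> fin_cases hk <;> decide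
  · have h0 : pvAliasOf.items.find? (fun p => p.1 == k) = none := by
      rw [List.find?_eq_none]
      intro p hp hpk
      have hm : p.1 ∈ ["iso-639-3", "Language", "Glottocode", "glottocode", "GramBank ID",
          "Grambank ID", "\\* Feature number", "Grambank", "Freetext comment", "Possible Values"] := by
        fin_cases hp <;> decide
      rw [beq_iff_eq] at hpk
      exact hk (hpk ▸ hm)
    have h1 : pvAliasOf.get? k = none := by
      rw [PySem.Dict.get?, h0]
      rfl
    have h2 : ca.2.contains k = false := by
      fin_cases hca <;> simp_all
    rw [h1, h2]
    rfl

lemma pvAliasRange (k c : String) (h : pvAliasOf.get? k = some c) :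
    c ∈ pvGBCols.map Prod.fst := by
  rw [PySem.Dict.get?] at h
  rcases e : pvAliasOf.items.find? (fun p => p.1 == k) with _ | p
  · rw [e] at h; simp at h
  · rw [e] at h
    simp only [Option.map_some, Option.some.injEq] at h
    have hp := List.mem_of_find?_eq_some e
    subst h
    fin_cases hp <;> decide

-- membership in a dict's values, given unique keys
lemma pvMemValues (f : PySem.Dict String String) (hn : f.keys.Nodup) (x : String) :
    x ∈ f.values ↔ ∃ c, f.get? c = some x := by
  constructor
  · intro hx
    rcases List.mem_map.mp hx with ⟨p, hp, rfl⟩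
    exact ⟨p.1, PySem.Dict.get?_of_mem_items f hp hn⟩
  · rintro ⟨c, hc⟩
    exact List.mem_map.mpr ⟨(c, x), PySem.Dict.mem_items_of_get?_eq_some f hc, rfl⟩

lemma pvConsumedSubset (cols : List (String × List String))
    (V : PySem.Dict String (Option String)) (x : String) (hx : x ∈ pvConsumed cols V) :
    ∃ ca ∈ cols, x ∈ ca.2 := by
  rcases List.mem_filterMap.mp hx with ⟨ca, hca, hif⟩
  refine ⟨ca, hca, ?_⟩
  split at hif
  · simp at hif
  · have := List.find?_some hif
    simpa using this

theorem pvFeedsAux (V : PySem.Dict String (Option String)) :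
    ∀ (ks : List String) (acc : PySem.Dict String String) (col : String),
    (ks.foldl (fun f k =>
        match pvAliasOf.get? k with
        | some c => if !V.contains c && !f.contains c then f.insert c k else f
        | none => f) acc).get? col
      = (acc.get? col).or
          (if V.contains col then none
           else ks.find? (fun k => pvAliasOf.get? k == some col)) := by
  intro ks
  induction ks with
  | nil =>
    intro acc col
    cases hV : V.contains col <;> simp [hV]
  | cons k ks ih =>
    intro acc col
    simp only [List.foldl_cons, List.find?_cons]
    rcases ha : pvAliasOf.get? k with _ | c <;> simp only [ha]
    · rw [ih]
      have hpred : (pvAliasOf.get? k == some col) = false := by simp [ha]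
      simp [hpred]
    · by_cases hif : (!V.contains c && !acc.contains c) = true
      · rw [if_pos hif]
        rw [ih]
        have hV : V.contains c = false := by
          rcases Bool.and_eq_true_iff.mp hif with ⟨h1, _⟩; simpa using h1
        have hacc : acc.contains c = false := by
          rcases Bool.and_eq_true_iff.mp hif with ⟨_, h2⟩; simpa using h2
        by_cases hcol : c = col
        · subst hcol
          have hpred : (pvAliasOf.get? k == some c) = true := by simp [ha]
          have e : acc.get? c = none := (PySem.Dict.get?_eq_none_iff_contains acc c).mpr hacc
          simp [hpred, PySem.Dict.get?_insert, e, hV]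
        · have hc : (c == col) = false := by simp [hcol]
          simp [hc, PySem.Dict.get?_insert, Ne.symm hcol]
      · rw [if_neg hif]
        rw [ih]
        by_cases hcol : c = col
        · subst hcol
          rcases e : acc.get? c with _ | v
          · have hacc : acc.contains c = false :=
              (PySem.Dict.get?_eq_none_iff_contains acc c).mp e
            have hV : V.contains c = true := by
              by_contra hV'
              exact hif (by simp [hacc, Bool.of_not_eq_true hV'])
            simp [e, hV]
          · simp [e]
        · have hc : (c == col) = false := by simp [hcol]
          simp [hc]

lemma pvFeedsNodup (V : PySem.Dict String (Option String)) :
    ∀ (ks : List String) (acc : PySem.Dict String String), acc.keys.Nodup →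
    (ks.foldl (fun f k =>
        match pvAliasOf.get? k with
        | some c => if !V.contains c && !f.contains c then f.insert c k else f
        | none => f) acc).keys.Nodup := by
  intro ks
  induction ks with
  | nil => intro acc h; simpa using h
  | cons k ks ih =>
    intro acc h
    simp only [List.foldl_cons]
    rcases ha : pvAliasOf.get? k with _ | c <;> simp only [ha]
    · exact ih _ h
    · refine ih _ ?_
      split
      · exact PySem.Dict.nodup_keys_insert _ _ _ h
      · exact h

lemma pvAnyFilterNe {β : Type} (l : List (String × β)) (r k : String) (h : r ≠ k) :
    (l.filter (fun p => !(p.1 == k))).any (fun p => p.1 == r) = l.any (fun p => p.1 == r) := by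
  induction l with
  | nil => simp
  | cons a l ih =>
    by_cases hak : a.1 = k
    · have h2 : (a.1 == r) = false := by
        rw [hak]; exact beq_eq_false_iff_ne.mpr (Ne.symm h)
      rw [List.filter_cons_of_neg (by simp [hak]), ih, List.any_cons, h2, Bool.false_or]
    · rw [List.filter_cons_of_pos (by simp [hak]), List.any_cons, List.any_cons, ih]

lemma pvFindFilterNe (l : List String) (pred : String → Bool) (k : String)
    (h : pred k = false) :
    (l.filter (fun x => !(x == k))).find? pred = l.find? pred := by
  induction l with
  | nil => simp
  | cons a l ih =>
    by_cases hak : a = k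
    · rw [List.filter_cons_of_neg (by simp [hak]), ih, List.find?_cons]
      simp only [hak, h, cond_false]
    · rw [List.filter_cons_of_pos (by simp [hak]), List.find?_cons, List.find?_cons, ih]

lemma pvFindPairFilterNe {β : Type} (l : List (String × β)) (x k : String) (h : x ≠ k) :
    (l.filter (fun p => !(p.1 == k))).find? (fun p => p.1 == x)
      = l.find? (fun p => p.1 == x) := by
  induction l with
  | nil => simp
  | cons a l ih =>
    by_cases hak : a.1 = k
    · have hax : (a.1 == x) = false := by
        rw [hak]; exact beq_eq_false_iff_ne.mpr (Ne.symm h)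
      rw [List.filter_cons_of_neg (by simp [hak]), ih, List.find?_cons]
      simp only [hax, cond_false]
    · rw [List.filter_cons_of_pos (by simp [hak]), List.find?_cons, List.find?_cons, ih]

-- spec pieces only depend on contains / find? / getD at the relevant keys
lemma pvSpecCongr (rest : List (String × List String))
    (V V' : PySem.Dict String (Option String))
    (hcont : ∀ r ∈ rest, V'.contains r.1 = V.contains r.1)
    (hfind : ∀ r ∈ rest, V'.keys.find? (fun x => r.2.contains x)
        = V.keys.find? (fun x => r.2.contains x))
    (hget : ∀ r ∈ rest, ∀ x, r.2.contains x = true → V'.getD x none = V.getD x none) :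
    pvConsumed rest V' = pvConsumed rest V ∧ pvExtra rest V' = pvExtra rest V := by
  constructor
  · apply List.filterMap_congr
    intro r hr
    rw [hcont r hr, hfind r hr]
  · apply List.filterMap_congr
    intro r hr
    rw [hcont r hr, hfind r hr]
    rcases hf : V.keys.find? (fun x => r.2.contains x) with _ | x
    · rfl
    · have hx : r.2.contains x = true := List.find?_some hf
      simp [hget r hr x hx]

theorem pvB1 (cols : List (String × List String)) :
    ∀ (V : PySem.Dict String (Option String)), V.keys.Nodup → pvHcols cols →
    cols.foldl pvFill V
      = PySem.Dict.mk (V.items.filter (fun p => !(pvConsumed cols V).contains p.1) ++ pvExtra cols V) := by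
  induction cols with
  | nil =>
    intro V _ _
    simp [pvConsumed, pvExtra]
  | cons ca rest ih =>
    intro V hn hc
    obtain ⟨h1, h2, h3⟩ := hc
    rw [List.map_cons, List.nodup_cons] at h1
    have hcrest : pvHcols rest :=
      ⟨h1.2, h2.tail,
       fun x hx y hy => h3 x (List.mem_cons_of_mem _ hx) y (List.mem_cons_of_mem _ hy)⟩
    have hcaself : ca.1 ∉ ca.2 := h3 ca List.mem_cons_self ca List.mem_cons_self
    have hcanotrest : ∀ r ∈ rest, (ca.1 == r.1) = false := by
      intro r hr
      simp only [beq_eq_false_iff_ne, ne_eq]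
      intro e
      exact h1.1 (e ▸ List.mem_map.mpr ⟨r, hr, rfl⟩)
    have hcanotr2 : ∀ r ∈ rest, r.2.contains ca.1 = false := by
      intro r hr
      have hnot := h3 ca List.mem_cons_self r (List.mem_cons_of_mem _ hr)
      simpa using hnot
    have hsurv : ((pvConsumed rest V).contains ca.1) = false := by
      cases hcc : (pvConsumed rest V).contains ca.1 with
      | false => rfl
      | true =>
        exfalso
        have hmem : ca.1 ∈ pvConsumed rest V := by simpa using hcc
        rcases pvConsumedSubset rest V ca.1 hmem with ⟨r, hr, hmemr⟩
        exact h3 ca List.mem_cons_self r (List.mem_cons_of_mem _ hr) hmemr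
    simp only [List.foldl_cons]
    by_cases hA : V.contains ca.1 = true
    · have hfill : pvFill V ca = V := by simp [pvFill, hA]
      have hcons : pvConsumed (ca :: rest) V = pvConsumed rest V := by
        unfold pvConsumed
        simp only [List.filterMap_cons]
        rw [hA, if_pos rfl]
      have hextra : pvExtra (ca :: rest) V = pvExtra rest V := by
        unfold pvExtra
        simp only [List.filterMap_cons]
        rw [hA, if_pos rfl]
      rw [hfill, ih V hn hcrest, hcons, hextra]
    · have hAf : V.contains ca.1 = false := by simpa using hA
      rcases hf : V.keys.find? (fun x => ca.2.contains x) with _ | k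
      · -- no alias present: append (ca.1, '')
        have hfill : pvFill V ca = V.insert ca.1 (some "") := by
          unfold pvFill
          rw [hAf, if_neg (by simp), hf]
        have hitems : (V.insert ca.1 (some "")).items = V.items ++ [(ca.1, some "")] :=
          PySem.Dict.items_insert_of_not_contains V _ hAf
        have hkeys : (V.insert ca.1 (some "")).keys = V.keys ++ [ca.1] :=
          PySem.Dict.keys_insert_of_not_contains V _ hAf
        have hn' : (V.insert ca.1 (some "")).keys.Nodup :=
          PySem.Dict.nodup_keys_insert _ _ _ hn
        have hcong := pvSpecCongr rest V (V.insert ca.1 (some ""))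
          (by
            intro r hr
            show (V.insert ca.1 (some "")).items.any _ = _
            rw [hitems, List.any_append]
            simp [hcanotrest r hr, PySem.Dict.contains])
          (by
            intro r hr
            have hnm : ca.1 ∉ r.2 := by simpa using hcanotr2 r hr
            rw [hkeys, List.find?_append]
            simp [List.find?_cons, hnm])
          (by
            intro r hr x hx
            have hxmem : x ∈ r.2 := by simpa using hx
            have hxca : (ca.1 == x) = false := by
              have hnot := h3 ca List.mem_cons_self r (List.mem_cons_of_mem _ hr)
              simp only [beq_eq_false_iff_ne, ne_eq]
              intro e
              exact hnot (e ▸ hxmem)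
            have hne : ca.1 ≠ x := by simpa using hxca
            simp only [PySem.Dict.getD, PySem.Dict.get?, hitems, List.find?_append]
            simp [List.find?_cons, hne])
        have hcons : pvConsumed (ca :: rest) V = pvConsumed rest V := by
          unfold pvConsumed
          simp only [List.filterMap_cons]
          rw [hAf, if_neg (by simp), hf]
        have hextra : pvExtra (ca :: rest) V = (ca.1, some "") :: pvExtra rest V := by
          unfold pvExtra
          simp only [List.filterMap_cons]
          rw [hAf, if_neg (by simp), hf]
        rw [hfill, ih _ hn' hcrest, hcong.1, hcong.2, hitems, hcons, hextra]
        have hsm : ca.1 ∉ pvConsumed rest V := by simpa using hsurv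
        rw [List.filter_append]
        simp [hsm]
      · -- alias k feeds the column: pop k, append (ca.1, V[k])
        have hkal : ca.2.contains k = true := List.find?_some hf
        have hkmem : k ∈ ca.2 := by simpa using hkal
        have hcerase : (V.erase k).contains ca.1 = false := by
          cases hcc : (V.erase k).contains ca.1 with
          | false => rfl
          | true =>
            exfalso
            rcases List.any_eq_true.mp (hcc : (V.erase k).items.any (fun p => p.1 == ca.1) = true)
              with ⟨p, hp, hpk⟩
            exact hA (List.any_eq_true.mpr ⟨p, List.mem_of_mem_filter hp, hpk⟩)
        have hfill : pvFill V ca = (V.erase k).insert ca.1 (V.getD k none) := by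
          unfold pvFill
          rw [hAf, if_neg (by simp), hf]
        have hitems : ((V.erase k).insert ca.1 (V.getD k none)).items
            = V.items.filter (fun p => !(p.1 == k)) ++ [(ca.1, V.getD k none)] :=
          PySem.Dict.items_insert_of_not_contains _ _ hcerase
        have hkeys : ((V.erase k).insert ca.1 (V.getD k none)).keys
            = V.keys.filter (fun x => !(x == k)) ++ [ca.1] := by
          rw [PySem.Dict.keys_insert_of_not_contains _ _ hcerase, pvKeysErase]
        have hn' : ((V.erase k).insert ca.1 (V.getD k none)).keys.Nodup :=
          PySem.Dict.nodup_keys_insert _ _ _ (by rw [pvKeysErase]; exact hn.filter _)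
        have hcong := pvSpecCongr rest V ((V.erase k).insert ca.1 (V.getD k none))
          (by
            intro r hr
            have hrk : r.1 ≠ k := fun e =>
              h3 r (List.mem_cons_of_mem _ hr) ca List.mem_cons_self (e ▸ hkmem)
            show ((V.erase k).insert ca.1 (V.getD k none)).items.any _ = _
            rw [hitems, List.any_append, pvAnyFilterNe V.items r.1 k hrk]
            simp [hcanotrest r hr, PySem.Dict.contains])
          (by
            intro r hr
            have hknr : r.2.contains k = false := by
              have := (List.pairwise_cons.mp h2).1 r hr k hkmem
              simpa using this
            have hnm : ca.1 ∉ r.2 := by simpa using hcanotr2 r hr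
            have hpq : r.2.contains = (fun x => decide (x ∈ r.2)) := by
              funext y; simp
            rw [hkeys, List.find?_append, pvFindFilterNe V.keys _ k hknr]
            simp [List.find?_cons, hnm]
            rw [hpq])
          (by
            intro r hr x hx
            have hxmem : x ∈ r.2 := by simpa using hx
            have hxk : x ≠ k := fun e =>
              ((List.pairwise_cons.mp h2).1 r hr k hkmem) (e ▸ hxmem)
            have hxca : (ca.1 == x) = false := by
              have hnot := h3 ca List.mem_cons_self r (List.mem_cons_of_mem _ hr)
              simp only [beq_eq_false_iff_ne, ne_eq]
              intro e
              exact hnot (e ▸ hxmem)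
            have hne : ca.1 ≠ x := by simpa using hxca
            have hq : ((V.erase k).insert ca.1 (V.getD k none)).get? x = V.get? x := by
              rw [PySem.Dict.get?, hitems, List.find?_append, pvFindPairFilterNe V.items x k hxk]
              simp [List.find?_cons, hne, PySem.Dict.get?]
            simp only [PySem.Dict.getD] at hq ⊢
            rw [hq])
        have hcons : pvConsumed (ca :: rest) V = k :: pvConsumed rest V := by
          unfold pvConsumed
          simp only [List.filterMap_cons]
          rw [hAf, if_neg (by simp), hf]
        have hextra : pvExtra (ca :: rest) V = (ca.1, V.getD k none) :: pvExtra rest V := by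
          unfold pvExtra
          simp only [List.filterMap_cons]
          rw [hAf, if_neg (by simp), hf]
        rw [hfill, ih _ hn' hcrest, hcong.1, hcong.2, hitems, hcons, hextra]
        rw [List.filter_append, List.filter_filter]
        have hpred : ∀ p ∈ V.items,
            (!(pvConsumed rest V).contains p.1 && !(p.1 == k))
              = !((k :: pvConsumed rest V).contains p.1) := by
          intro p _
          simp [List.contains_cons, Bool.not_or, Bool.and_comm, beq_eq_decide]
        have hsm : ca.1 ∉ pvConsumed rest V := by simpa using hsurv
        rw [List.filter_congr hpred]
        simp [hsm]

-- characterization of B's feeds dict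
theorem pvFeeds (V : PySem.Dict String (Option String)) (col : String) :
    (V.keys.foldl (fun f k =>
        match pvAliasOf.get? k with
        | some c => if !V.contains c && !f.contains c then f.insert c k else f
        | none => f) PySem.Dict.empty).get? col
      = if V.contains col then none
        else V.keys.find? (fun k => pvAliasOf.get? k == some col) := by
  rw [pvFeedsAux V V.keys PySem.Dict.empty col]
  simp [PySem.Dict.get?_empty]

theorem pvC (g : List (String × Option String)) (hn : (g.map Prod.fst).Nodup)
    (h1 : "Language_ID" ∈ g.map Prod.fst) (h2 : "Feature_ID" ∈ g.map Prod.fst)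
    (h3 : "Value" ∈ g.map Prod.fst) (h4 : "Comment" ∈ g.map Prod.fst) :
    (let e4 := (PySem.Dict.mk g).insert "Language_ID" none
     let e5 := e4.insert "Feature_ID" ((e4.getD "Feature_ID" none).map pvNormalizedFeatureId)
     let e6 := e5.insert "Value" (pvNormalizedValue (e5.getD "Value" none))
     let e7 := e6.insert "Comment" (pvNormalizeComment (e6.getD "Comment" none))
     e7.items) = g.map (fun p => (p.1, pvFix p.1 p.2)) := by
  have hgn : (PySem.Dict.mk g).keys.Nodup := by simpa [PySem.Dict.keys] using hn
  have hcL : (PySem.Dict.mk g).contains "Language_ID" = true :=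
    (PySem.Dict.contains_iff_mem_keys _ _).mpr (by simpa [PySem.Dict.keys] using h1)
  have hcF : (PySem.Dict.mk g).contains "Feature_ID" = true :=
    (PySem.Dict.contains_iff_mem_keys _ _).mpr (by simpa [PySem.Dict.keys] using h2)
  have hcV : (PySem.Dict.mk g).contains "Value" = true :=
    (PySem.Dict.contains_iff_mem_keys _ _).mpr (by simpa [PySem.Dict.keys] using h3)
  have hcC : (PySem.Dict.mk g).contains "Comment" = true :=
    (PySem.Dict.contains_iff_mem_keys _ _).mpr (by simpa [PySem.Dict.keys] using h4)
  simp only []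
  -- stage-wise contains facts
  have hc4F : ((PySem.Dict.mk g).insert "Language_ID" none).contains "Feature_ID" = true := by
    simp [PySem.Dict.contains_insert, hcF]
  have hc5V : ∀ (w : Option String),
      (((PySem.Dict.mk g).insert "Language_ID" none).insert "Feature_ID" w).contains "Value"
        = true := by
    intro w
    simp [PySem.Dict.contains_insert, hcV]
  -- getD reductions to the base dict
  have hg4 : (((PySem.Dict.mk g).insert "Language_ID" none).getD "Feature_ID" none)
      = (PySem.Dict.mk g).getD "Feature_ID" none := by
    rw [PySem.Dict.getD_insert]; simp
  have hg5 : ∀ (w : Option String),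
      ((((PySem.Dict.mk g).insert "Language_ID" none).insert "Feature_ID" w).getD "Value" none)
      = (PySem.Dict.mk g).getD "Value" none := by
    intro w
    rw [PySem.Dict.getD_insert, PySem.Dict.getD_insert]; simp
  have hg6 : ∀ (w w' : Option String),
      (((((PySem.Dict.mk g).insert "Language_ID" none).insert "Feature_ID" w).insert "Value"
        w').getD "Comment" none)
      = (PySem.Dict.mk g).getD "Comment" none := by
    intro w w'
    rw [PySem.Dict.getD_insert, PySem.Dict.getD_insert, PySem.Dict.getD_insert]; simp
  have hc6C : ∀ (w w' : Option String),
      ((((PySem.Dict.mk g).insert "Language_ID" none).insert "Feature_ID" w).insert "Value"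
        w').contains "Comment" = true := by
    intro w w'
    simp [PySem.Dict.contains_insert, hcC]
  rw [hg4, hg5, hg6]
  rw [PySem.Dict.items_insert_of_contains _ _ (hc6C _ _),
    PySem.Dict.items_insert_of_contains _ _ (hc5V _),
    PySem.Dict.items_insert_of_contains _ _ hc4F,
    PySem.Dict.items_insert_of_contains _ _ hcL]
  show (((g.map _).map _).map _).map _ = _
  simp only [List.map_map]
  apply List.map_congr_left
  intro p hp
  have hget : ∀ (s : String), p.1 = s → (PySem.Dict.mk g).getD s none = p.2 := by
    intro s hs
    have hmem : (s, p.2) ∈ g := by rw [← hs]; simpa using hp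
    have := PySem.Dict.get?_of_mem_items (PySem.Dict.mk g) (k := s) (v := p.2) hmem hgn
    simp [PySem.Dict.getD, this]
  simp only [Function.comp]
  by_cases hL : p.1 = "Language_ID"
  · simp [hL, pvFix]
  · by_cases hF : p.1 = "Feature_ID"
    · simp [hF, hL, pvFix, hget _ hF]
    · by_cases hV : p.1 = "Value"
      · simp [hV, hL, hF, pvFix, hget _ hV]
      · by_cases hC : p.1 = "Comment"
        · simp [hC, hL, hF, hV, pvFix, hget _ hC]
        · simp [hL, hF, hV, hC, pvFix]


lemma pvContainsCongr {α : Type} [BEq α] [LawfulBEq α] (l₁ l₂ : List α) (x : α)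
    (h : x ∈ l₁ ↔ x ∈ l₂) : l₁.contains x = l₂.contains x := by
  have e1 : l₁.contains x = decide (x ∈ l₁) := by simp
  have e2 : l₂.contains x = decide (x ∈ l₂) := by simp
  rw [e1, e2]
  exact decide_eq_decide.mpr h

-- B's consumed set has the same members as A's popped keys
lemma pvConsumedMem (V : PySem.Dict String (Option String)) (x : String) :
    (x ∈ PySem.Set.ofList (V.keys.foldl (fun f k =>
        match pvAliasOf.get? k with
        | some c => if !V.contains c && !f.contains c then f.insert c k else f
        | none => f) PySem.Dict.empty).values)
    ↔ x ∈ pvConsumed pvGBCols V := by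
  have hfn : (V.keys.foldl (fun f k =>
      match pvAliasOf.get? k with
      | some c => if !V.contains c && !f.contains c then f.insert c k else f
      | none => f) PySem.Dict.empty).keys.Nodup :=
    pvFeedsNodup V V.keys PySem.Dict.empty (by simp [PySem.Dict.keys, PySem.Dict.empty])
  rw [PySem.Set.mem_ofList, pvMemValues _ hfn]
  constructor
  · rintro ⟨c, hc⟩
    rw [pvFeeds] at hc
    by_cases hV : V.contains c = true
    · rw [if_pos hV] at hc; exact absurd hc (by simp)
    · rw [if_neg (by simp [hV])] at hc
      have hpx := List.find?_some hc
      have hax : pvAliasOf.get? x = some c := by simpa using hpx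
      rcases List.mem_map.mp (pvAliasRange x c hax) with ⟨ca, hca, hfst⟩
      have hpeq : (fun k => pvAliasOf.get? k == some c) = (fun k => ca.2.contains k) := by
        funext y
        rw [← hfst]
        exact pvAliasSpec ca hca y
    -- rebuild the filterMap membership
      apply List.mem_filterMap.mpr
      refine ⟨ca, hca, ?_⟩
      rw [show V.contains ca.1 = false from by rw [hfst]; simpa using hV, if_neg (by simp)]
      rw [← hpeq]
      exact hc
  · intro hx
    rcases List.mem_filterMap.mp hx with ⟨ca, hca, hif⟩
    by_cases hV : V.contains ca.1 = true
    · rw [if_pos hV] at hif; exact absurd hif (by simp)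
    · rw [if_neg (by simp [hV])] at hif
      refine ⟨ca.1, ?_⟩
      rw [pvFeeds, if_neg (by simp [hV])]
      have hpeq : (fun k => pvAliasOf.get? k == some ca.1) = (fun k => ca.2.contains k) :=
        funext fun y => pvAliasSpec ca hca y
      rw [hpeq]
      exact hif

-- every canonical column ends up among the result's keys
lemma pvColMem (V : PySem.Dict String (Option String)) (col : String)
    (hcol : col ∈ pvGBCols.map Prod.fst) (hnal : ∀ ca ∈ pvGBCols, col ∉ ca.2) :
    col ∈ (V.items.filter (fun p => !(pvConsumed pvGBCols V).contains p.1)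
      ++ pvExtra pvGBCols V).map Prod.fst := by
  by_cases hV : V.contains col = true
  · rcases List.any_eq_true.mp (hV : V.items.any (fun p => p.1 == col) = true) with ⟨p, hp, hpk⟩
    have hpcol : p.1 = col := by simpa using hpk
    have hsurv : ((pvConsumed pvGBCols V).contains p.1) = false := by
      cases hcc : (pvConsumed pvGBCols V).contains p.1 with
      | false => rfl
      | true =>
        exfalso
        have hmem : p.1 ∈ pvConsumed pvGBCols V := by simpa using hcc
        rcases pvConsumedSubset _ _ _ hmem with ⟨ca, hca, hmemr⟩
        exact hnal ca hca (hpcol ▸ hmemr)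
    refine List.mem_map.mpr ⟨p, ?_, hpcol⟩
    exact List.mem_append_left _ (List.mem_filter.mpr ⟨hp, by simpa using hsurv⟩)
  · rcases List.mem_map.mp hcol with ⟨ca, hca, hfst⟩
    refine List.mem_map.mpr ⟨(ca.1, match V.keys.find? (fun k => ca.2.contains k) with
      | some k => V.getD k none | none => some ""), List.mem_append_right _ ?_, hfst⟩
    apply List.mem_filterMap.mpr
    refine ⟨ca, hca, ?_⟩
    rw [show V.contains ca.1 = false from by rw [hfst]; simpa using hV, if_neg (by simp)]

-- the whole pipeline after the strip/move phase, for an arbitrary start dict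
lemma pvMain (V : PySem.Dict String (Option String)) (hn : V.keys.Nodup) :
    (((((pvGBCols.foldl (fun d ca => if d.contains ca.1 then d else (match d.keys.find? (fun k => ca.2.contains k) with | some k => (d.erase k).insert ca.1 (d.getD k none) | none => d.insert ca.1 (some ""))) V).insert "Language_ID" none).insert "Feature_ID" ((((pvGBCols.foldl (fun d ca => if d.contains ca.1 then d else (match d.keys.find? (fun k => ca.2.contains k) with | some k => (d.erase k).insert ca.1 (d.getD k none) | none => d.insert ca.1 (some ""))) V).insert "Language_ID" none).getD "Feature_ID" none).map pvNormalizedFeatureId)).insert "Value" (pvNormalizedValue ((((pvGBCols.foldl (fun d ca => if d.contains ca.1 then d else (match d.keys.find? (fun k => ca.2.contains k) with | some k => (d.erase k).insert ca.1 (d.getD k none) | none => d.insert ca.1 (some ""))) V).insert "Language_ID" none).insert "Feature_ID" ((((pvGBCols.foldl (fun d ca => if d.contains ca.1 then d else (match d.keys.find? (fun k => ca.2.contains k) with | some k => (d.erase k).insert ca.1 (d.getD k none) | none => d.insert ca.1 (some ""))) V).insert "Language_ID" none).getD "Feature_ID" none).map pvNormalizedFeatureId)).getD "Value" none))).insert "Comment"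 (pvNormalizeComment (((((pvGBCols.foldl (fun d ca => if d.contains ca.1 then d else (match d.keys.find? (fun k => ca.2.contains k) with | some k => (d.erase k).insert ca.1 (d.getD k none) | none => d.insert ca.1 (some ""))) V).insert "Language_ID" none).insert "Feature_ID" ((((pvGBCols.foldl (fun d ca => if d.contains ca.1 then d else (match d.keys.find? (fun k => ca.2.contains k) with | some k => (d.erase k).insert ca.1 (d.getD k none) | none => d.insert ca.1 (some ""))) V).insert "Language_ID" none).getD "Feature_ID" none).map pvNormalizedFeatureId)).insert "Value" (pvNormalizedValue ((((pvGBCols.foldl (fun d ca => if d.contains ca.1 then d else (match d.keys.find? (fun k => ca.2.contains k) with | some k => (d.erase k).insert ca.1 (d.getD k none) | none => d.insert ca.1 (some ""))) V).insert "Language_ID" none).insert "Feature_ID" ((((pvGBCols.foldl (fun d ca => if d.contains ca.1 then d else (match d.keys.find? (fun k => ca.2.contains k) with | some k => (d.erase k).insert ca.1 (d.getD k none) | none => d.insert ca.1 (some ""))) V).insert "Language_ID" none).getD "Feature_ID" none).map pvNormalizedFeatureId)).getD "Value" none))).getD "Comment" none))).items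
    = ((V.items.filter (fun (p : String × Option String) => !(PySem.Set.ofList (V.keys.foldl (fun (f : PySem.Dict String String) (k : String) => (match pvAliasOf.get? k with | some col => if !V.contains col && !f.contains col then f.insert col k else f | none => f)) (PySem.Dict.empty : PySem.Dict String String)).values).contains p.1) ++ pvGBCols.filterMap (fun (ca : String × List String) => if V.contains ca.1 then none else some (ca.1, (match (V.keys.foldl (fun (f : PySem.Dict String String) (k : String) => (match pvAliasOf.get? k with | some col => if !V.contains col && !f.contains col then f.insert col k else f | none => f)) (PySem.Dict.empty : PySem.Dict String String)).get? ca.1 with | some k => V.getD k none | none => some "")))).map (fun (p : String × Option String) => (p.1, pvFix p.1 p.2))) := by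
  have hfold : pvGBCols.foldl (fun d ca =>
      if d.contains ca.1 then d
      else match d.keys.find? (fun k => ca.2.contains k) with
        | some k => (d.erase k).insert ca.1 (d.getD k none)
        | none => d.insert ca.1 (some "")) V = pvGBCols.foldl pvFill V := rfl
  have hcols : pvHcols pvGBCols := by
    unfold pvHcols pvGBCols
    refine ⟨by decide, ?_, by decide⟩
    decide
  have hk3 : (pvGBCols.foldl pvFill V).keys.Nodup := pvNodupFill pvGBCols V hn
  rw [hfold, pvB1 pvGBCols V hn hcols]
  rw [pvB1 pvGBCols V hn hcols] at hk3
  -- bridge B's kept/extra to the spec shapes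
  have hkept : V.items.filter (fun p => !(PySem.Set.ofList (V.keys.foldl (fun f k =>
        match pvAliasOf.get? k with
        | some col => if !V.contains col && !f.contains col then f.insert col k else f
        | none => f) PySem.Dict.empty).values).contains p.1)
      = V.items.filter (fun p => !(pvConsumed pvGBCols V).contains p.1) := by
    apply List.filter_congr
    intro p _
    exact congrArg Bool.not (pvContainsCongr _ _ p.1 (pvConsumedMem V p.1))
  have hextra : pvGBCols.filterMap (fun ca =>
        if V.contains ca.1 then none
        else some (ca.1, match (V.keys.foldl (fun f k =>
            match pvAliasOf.get? k with
            | some col => if !V.contains col && !f.contains col then f.insert col k else f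
            | none => f) PySem.Dict.empty).get? ca.1 with
          | some k => V.getD k none
          | none => some "")) = pvExtra pvGBCols V := by
    apply List.filterMap_congr
    intro ca hca
    by_cases hV : V.contains ca.1 = true
    · simp [hV]
    · rw [if_neg (by simp [hV]), if_neg (by simp [hV])]
      rw [pvFeeds, if_neg (by simp [hV])]
      have hpeq : (fun k => pvAliasOf.get? k == some ca.1) = (fun k => ca.2.contains k) :=
        funext fun y => pvAliasSpec ca hca y
      rw [hpeq]
  rw [hkept, hextra]
  exact pvC _ (by simpa [PySem.Dict.keys] using hk3)
    (pvColMem V "Language_ID" (by decide) (by decide))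
    (pvColMem V "Feature_ID" (by decide) (by decide))
    (pvColMem V "Value" (by decide) (by decide))
    (pvColMem V "Comment" (by decide) (by decide))

-- ===== VERDICT (by name: the statement is the Claim_ definition above) =====
theorem normalized_row_py_spec : Claim_equal_normalized_row_py := by
  unfold Claim_equal_normalized_row_py
  intro row _ _
  unfold Spec_normalized_row_py
  simp only [normalized_row_py, normalized_row_py_alt]
  rw [pvStep0 (PySem.Dict.ofList row) (PySem.Dict.nodup_keys_ofList row)]
  exact pvMain _ (pvNodupPhase2 _ (pvNodupStrip row))
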